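-- pv_equiv track=rewrite | github.com/nouhabtb8/OptiMatch-app-for-Expleo | requirement_researcher.py | expand_prefix_conflicts_as_or
-- ===== SOURCE A (Python) =====
-- from itertools import product
--
-- def expand_prefix_conflicts_as_or(thms):
--     prefix_map = {}
--     for th in thms:
--         prefix = th.split("_")[0]
--         prefix_map.setdefault(prefix, []).append(th)
--
--     if all(len(v) == 1 for v in prefix_map.values()):
--         return [thms]
--
--     all_options = list(prefix_map.values())
--     result = []
--     for combo in product(*all_options):
--         prefixes = [t.split("_")[0] for t in combo]
--         if len(set(prefixes)) == len(combo):
--             result.append(combo)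
--     return [list(group) for group in result]
-- ===== SOURCE B (Python) =====
-- def expand_prefix_conflicts_as_or(thms):
--     # Recursive partition: peel off the group sharing the first element's prefix,
--     # recurse on the remaining elements, and combine each choice with each tail.
--     if not thms:
--         return [[]]
--     p = thms[0].split("_")[0]
--     same = [t for t in thms if t.split("_")[0] == p]
--     others = [t for t in thms if t.split("_")[0] != p]
--     tails = expand_prefix_conflicts_as_or(others)
--     return [[c] + tail for c in same for tail in tails]
-- ===== Notes on version B (the rewrite author's own statement) =====
-- stated objective: simpler
-- what changed: Replaces the dict grouping pass, itertools.product, the distinct-prefix filter and the all-singletons special case by a single structural recursion that partitions the list on the first element's prefix and combines each group member with each recursively built tail.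
import Mathlib
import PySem

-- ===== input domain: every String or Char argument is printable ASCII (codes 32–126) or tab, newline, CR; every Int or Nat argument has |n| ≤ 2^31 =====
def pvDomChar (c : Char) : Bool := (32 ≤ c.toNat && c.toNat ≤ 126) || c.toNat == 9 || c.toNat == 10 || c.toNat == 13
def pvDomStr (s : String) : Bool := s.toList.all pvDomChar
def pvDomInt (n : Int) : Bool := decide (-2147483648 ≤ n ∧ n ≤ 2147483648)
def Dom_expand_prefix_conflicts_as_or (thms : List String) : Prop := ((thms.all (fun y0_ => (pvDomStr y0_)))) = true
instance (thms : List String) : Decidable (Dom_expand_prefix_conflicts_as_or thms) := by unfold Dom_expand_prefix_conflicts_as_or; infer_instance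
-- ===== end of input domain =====

-- B replaces the dict grouping + itertools.product + distinct-prefix filter + singleton special case
-- by one structural recursion that peels off the first element's prefix group (objective: simpler).

-- ===== PORT A =====
-- th.split("_")[0]: split? is some for the non-empty separator "_" and always yields a
-- non-empty list of pieces, so the Python [0] is the head (getD/headD defaults are never used)
def pvPrefix (th : String) : String := ((PySem.Str.split? th "_").getD []).headD ""

-- the grouping loop: setdefault(prefix, []).append(th) mutates the stored list, i.e. modify prefix [] (· ++ [th])
def pvGroups (thms : List String) : PySem.Dict String (List String) :=
  thms.foldl (fun d th => d.modify (pvPrefix th) [] (· ++ [th])) PySem.Dict.empty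

-- literal port of itertools.product over a list of lists (first factor varies slowest)
def pyProductA : List (List String) → List (List String)
  | [] => [[]]
  | g :: gs => g.flatMap (fun x => (pyProductA gs).map (fun c => x :: c))

def expand_prefix_conflicts_as_or (thms : List String) : List (List String) :=
  let prefix_map := pvGroups thms
  if prefix_map.values.all (fun v => v.length == 1) then [thms]
  else
    let all_options := prefix_map.values
    let result := (pyProductA all_options).filter
      (fun combo => (PySem.Set.ofList (combo.map pvPrefix)).length == combo.length)
    result.map (fun group => group)

-- ===== PORT B =====
-- recursion on the input list: split it into the first element's prefix group and the rest
def expand_prefix_conflicts_as_or_alt (thms : List String) : List (List String) :=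
  match thms with
  | [] => [[]]
  | t :: rest =>
    let p := pvPrefix t
    let same := (t :: rest).filter (fun x => pvPrefix x == p)
    let others := (t :: rest).filter (fun x => !(pvPrefix x == p))
    let tails := expand_prefix_conflicts_as_or_alt others
    same.flatMap (fun c => tails.map (fun tail => c :: tail))
termination_by thms.length
decreasing_by
  have hsame : (t :: rest).filter (fun x => !(pvPrefix x == pvPrefix t))
      = rest.filter (fun x => !(pvPrefix x == pvPrefix t)) := by
    simp
  rw [hsame]
  exact Nat.lt_succ_of_le (List.length_filter_le _ _)

-- ===== PRECONDITION & SPEC =====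
def Spec_expand_prefix_conflicts_as_or (thms : List String) (out : List (List String)) : Prop := out = expand_prefix_conflicts_as_or_alt thms
instance (thms : List String) (out : List (List String)) : Decidable (Spec_expand_prefix_conflicts_as_or thms out) := by unfold Spec_expand_prefix_conflicts_as_or; infer_instance

-- ===== CLAIM =====
def Claim_equal_expand_prefix_conflicts_as_or : Prop := ∀ (thms : List String), Dom_expand_prefix_conflicts_as_or thms → Spec_expand_prefix_conflicts_as_or thms (expand_prefix_conflicts_as_or thms)

-- ===== LEMMAS AND PROOFS =====

-- the ordered group list both programs implicitly share
def pvGroupList (l : List String) : List (List String) :=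
  (PySem.Set.ofList (l.map pvPrefix)).map (fun k => l.filter (fun th => pvPrefix th == k))

-- value stored at key k in the groups dict
theorem getD_pvGroups (thms : List String) (k : String) :
    (pvGroups thms).getD k [] = thms.filter (fun th => pvPrefix th == k) := by
  have h : pvGroups thms
      = (thms.map (fun th => (pvPrefix th, th))).foldl
          (fun d p => d.modify p.1 [] (· ++ [p.2])) PySem.Dict.empty := by
    rw [List.foldl_map]; rfl
  rw [h, PySem.Dict.getD_foldl_modify_append]
  simp only [PySem.Dict.getD_empty, List.nil_append, List.filter_map, List.map_map]
  simp [Function.comp_def]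

theorem nodup_keys_pvGroups (thms : List String) : (pvGroups thms).keys.Nodup :=
  PySem.Dict.nodup_keys_foldl_modify_key thms pvPrefix [] (fun _ th => (· ++ [th]))
    PySem.Dict.empty (by simp)

theorem keys_pvGroups (thms : List String) :
    (pvGroups thms).keys = PySem.Set.ofList (thms.map pvPrefix) := by
  rw [pvGroups, PySem.Dict.keys_foldl_modify_key thms pvPrefix [] (fun _ th => (· ++ [th]))]
  simp [PySem.Set.update_nil_left]

theorem values_pvGroups (thms : List String) :
    (pvGroups thms).values = pvGroupList thms := by
  rw [PySem.Dict.values_eq_map_keys _ (nodup_keys_pvGroups thms) [], keys_pvGroups]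
  exact List.map_congr_left (fun k _ => getD_pvGroups thms k)

-- adding elements already skips a value present in the accumulating set
theorem foldl_add_skip {p : String} (xs : List String) (acc : PySem.Set String) (hp : p ∈ acc) :
    xs.foldl PySem.Set.add acc = (xs.filter (fun x => !(x == p))).foldl PySem.Set.add acc := by
  induction xs generalizing acc with
  | nil => rfl
  | cons x xs ih =>
    by_cases hx : x == p
    · have hxp : x = p := eq_of_beq hx
      have : PySem.Set.add acc x = acc := by
        simp [PySem.Set.add, PySem.Set.contains, hxp, hp]
      simp [hx, this, ih acc hp]
    · have hp' : p ∈ PySem.Set.add acc x := by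
        simp [PySem.Set.add]; split <;> simp [hp]
      simp [hx, ih _ hp']

-- folding Set.add over elements all distinct from p keeps the leading p in place
theorem foldl_add_cons (p : String) (ys : List String) (s : PySem.Set String)
    (h : ∀ y ∈ ys, (y == p) = false) :
    ys.foldl PySem.Set.add (p :: s) = p :: ys.foldl PySem.Set.add s := by
  induction ys generalizing s with
  | nil => rfl
  | cons y ys ih =>
    have hy := h y (List.mem_cons_self)
    have hc : PySem.Set.contains (p :: s) y = PySem.Set.contains s y := by
      simp [PySem.Set.contains]
      intro hpy; rw [hpy] at hy; simp at hy
    have hyp : y ≠ p := fun e => by simp [e] at hy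
    have hadd : PySem.Set.add (p :: s) y = p :: PySem.Set.add s y := by
      by_cases hm : y ∈ s
      · simp [PySem.Set.add, PySem.Set.contains, hm, hyp]
      · simp [PySem.Set.add, PySem.Set.contains, hm, hyp]
    rw [List.foldl_cons, List.foldl_cons, hadd, ih _ (fun z hz => h z (List.mem_cons_of_mem _ hz))]

theorem ofList_cons_skip (p : String) (xs : List String) :
    PySem.Set.ofList (p :: xs) = p :: PySem.Set.ofList (xs.filter (fun x => !(x == p))) := by
  have h0 : PySem.Set.ofList (p :: xs) = xs.foldl PySem.Set.add [p] := by
    rw [PySem.Set.ofList_eq_foldl]; rfl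
  rw [h0, foldl_add_skip xs [p] (List.mem_singleton.mpr rfl), PySem.Set.ofList_eq_foldl]
  exact foldl_add_cons p _ [] (fun y hy => by
    have := List.of_mem_filter hy; simpa using this)

-- the group list of t :: rest splits into t's group and the group list of the others
theorem pvGroupList_cons (t : String) (rest : List String) :
    pvGroupList (t :: rest)
      = ((t :: rest).filter (fun x => pvPrefix x == pvPrefix t))
        :: pvGroupList ((t :: rest).filter (fun x => !(pvPrefix x == pvPrefix t))) := by
  have hothers : (t :: rest).filter (fun x => !(pvPrefix x == pvPrefix t))
      = rest.filter (fun x => !(pvPrefix x == pvPrefix t)) := by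
    simp
  have hmapf : ((rest.filter (fun x => !(pvPrefix x == pvPrefix t))).map pvPrefix)
      = (rest.map pvPrefix).filter (fun y => !(y == pvPrefix t)) := by
    rw [List.filter_map]; rfl
  unfold pvGroupList
  rw [hothers, hmapf, List.map_cons, ofList_cons_skip, List.map_cons]
  congr 1
  apply List.map_congr_left
  intro k hk
  have hkp : (k == pvPrefix t) = false := by
    have := (PySem.Set.mem_ofList _ _).mp hk
    have := List.of_mem_filter this
    simpa using this
  have hhead : (pvPrefix t == k) = false := by
    rcases h2 : pvPrefix t == k with _ | _
    · rfl
    · rw [eq_of_beq h2] at hkp; simp at hkp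
  rw [List.filter_filter,
    show List.filter (fun th => pvPrefix th == k) (t :: rest)
      = List.filter (fun th => pvPrefix th == k) rest from by simp [List.filter_cons, hhead]]
  apply List.filter_congr
  intro x _
  by_cases hx : pvPrefix x == k
  · have : pvPrefix x = k := eq_of_beq hx
    simp [this, hkp]
  · simp [hx]

-- B's recursion computes the product of the ordered group list
theorem alt_eq_product (l : List String) :
    expand_prefix_conflicts_as_or_alt l = pyProductA (pvGroupList l) := by
  have key : ∀ n (l : List String), l.length ≤ n →
      expand_prefix_conflicts_as_or_alt l = pyProductA (pvGroupList l) := by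
    intro n
    induction n with
    | zero =>
      intro l hl
      have : l = [] := List.eq_nil_of_length_eq_zero (Nat.le_zero.mp hl)
      subst this
      rw [expand_prefix_conflicts_as_or_alt]; rfl
    | succ n ih =>
      intro l hl
      match l with
      | [] => rw [expand_prefix_conflicts_as_or_alt]; rfl
      | t :: rest =>
        rw [expand_prefix_conflicts_as_or_alt, pvGroupList_cons, pyProductA]
        have hothers : (t :: rest).filter (fun x => !(pvPrefix x == pvPrefix t))
            = rest.filter (fun x => !(pvPrefix x == pvPrefix t)) := by
          simp
        have hlen : ((t :: rest).filter (fun x => !(pvPrefix x == pvPrefix t))).length ≤ n := by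
          rw [hothers]
          exact le_trans (List.length_filter_le _ _) (Nat.le_of_succ_le_succ hl)
        rw [ih _ hlen]
  exact key l.length l le_rfl

-- count of a prefix among all prefixes = size of its group
theorem count_prefix_eq_length_filter (thms : List String) (k : String) :
    (thms.map pvPrefix).count k = (thms.filter (fun th => pvPrefix th == k)).length := by
  induction thms with
  | nil => rfl
  | cons t ts ih => by_cases h : pvPrefix t == k <;> simp [List.count_cons, h, ih]

-- every element of the group at key k has prefix k; a combo therefore lists the (distinct) keys
theorem combo_prefixes (ks : List String) (thms : List String) (combo : List String)
    (hc : combo ∈ pyProductA (ks.map (fun k => thms.filter (fun th => pvPrefix th == k)))) :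
    combo.map pvPrefix = ks := by
  induction ks generalizing combo with
  | nil => simp [pyProductA] at hc; simp [hc]
  | cons k ks ih =>
    simp only [List.map_cons, pyProductA, List.mem_flatMap, List.mem_map] at hc
    obtain ⟨x, hx, c, hcmem, rfl⟩ := hc
    simp only [List.mem_filter] at hx
    simp [ih c hcmem, eq_of_beq hx.2]

theorem filter_product_all (thms : List String) :
    (pyProductA (pvGroups thms).values).filter
        (fun combo => (PySem.Set.ofList (combo.map pvPrefix)).length == combo.length)
      = pyProductA (pvGroups thms).values := by
  apply List.filter_eq_self.mpr
  intro combo hc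
  rw [values_pvGroups] at hc
  have hpref := combo_prefixes _ thms combo hc
  have hnd : (combo.map pvPrefix).Nodup := by
    rw [hpref]; exact PySem.Set.nodup_ofList _
  rw [PySem.Set.ofList_eq_self_of_nodup _ hnd]
  simp

-- the product of singleton groups is the one full combination
theorem product_singletons (l : List String) : pyProductA (l.map (fun t => [t])) = [l] := by
  induction l with
  | nil => rfl
  | cons t ts ih => simp [pyProductA, ih]

-- all-singletons case: prefixes are pairwise distinct and the product is [thms]
theorem all_singleton_case (thms : List String)
    (h : (pvGroups thms).values.all (fun v => v.length == 1)) :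
    pyProductA (pvGroups thms).values = [thms] := by
  have hcount : ∀ k ∈ PySem.Set.ofList (thms.map pvPrefix),
      (thms.filter (fun th => pvPrefix th == k)).length = 1 := by
    intro k hk
    have := List.all_eq_true.mp h _ (by
      rw [values_pvGroups, pvGroupList]; exact List.mem_map.mpr ⟨k, hk, rfl⟩)
    simpa using this
  have hnd : (thms.map pvPrefix).Nodup := by
    rw [List.nodup_iff_count_le_one]
    intro k
    by_cases hk : k ∈ thms.map pvPrefix
    · have h1 := hcount k ((PySem.Set.mem_ofList _ _).mpr hk)
      rw [count_prefix_eq_length_filter, h1]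
    · simp [List.count_eq_zero_of_not_mem hk]
  have hvals : (pvGroups thms).values = thms.map (fun t => [t]) := by
    rw [values_pvGroups, pvGroupList, PySem.Set.ofList_eq_self_of_nodup _ hnd, List.map_map]
    apply List.map_congr_left
    intro t ht
    have hmem : t ∈ thms.filter (fun th => pvPrefix th == (pvPrefix t)) := by
      simp [List.mem_filter, ht]
    have hlen := hcount (pvPrefix t)
      ((PySem.Set.mem_ofList _ _).mpr (List.mem_map.mpr ⟨t, ht, rfl⟩))
    obtain ⟨a, ha⟩ := List.length_eq_one_iff.mp hlen
    rw [Function.comp_apply, ha]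
    rw [ha] at hmem
    simp only [List.mem_singleton] at hmem
    rw [hmem]
  rw [hvals, product_singletons]

-- ===== VERDICT =====
theorem expand_prefix_conflicts_as_or_spec : Claim_equal_expand_prefix_conflicts_as_or := by
  intro thms _
  unfold Spec_expand_prefix_conflicts_as_or expand_prefix_conflicts_as_or
  rw [alt_eq_product, ← values_pvGroups]
  by_cases h : (pvGroups thms).values.all (fun v => v.length == 1)
  · simp only [h, if_true]
    exact (all_singleton_case thms h).symm
  · simp only [h, filter_product_all]
    simp
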